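-- pv_equiv track=rewrite | github.com/Wangt-CN/DisCo | dataset/data_utils/node_sampler.py | find_start_tsv_idx
-- ===== SOURCE A (Python) =====
-- def find_start_tsv_idx(num_each_tsv_file, node_offset):
--     x = node_offset
--     start_tsv_idx = None
--     for tsv_idx, tsv_size in enumerate(num_each_tsv_file):
--         x -= tsv_size
--         if x < 0:
--             start_tsv_idx = tsv_idx
--             break
--     assert start_tsv_idx is not None, (node_offset, sum(num_each_tsv_file))
--     return start_tsv_idx
-- ===== SOURCE B (Python) =====
-- def find_start_tsv_idx(num_each_tsv_file, node_offset):
--     # Prefix-sum table once, then binary search (bisect_right by hand) for the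
--     # first index whose cumulative size strictly exceeds the offset.
--     prefix = []
--     total = 0
--     for n in num_each_tsv_file:
--         total += n
--         prefix.append(total)
--     assert node_offset < total, (node_offset, total)
--     lo, hi = 0, len(prefix)
--     while lo < hi:
--         mid = (lo + hi) // 2
--         if prefix[mid] <= node_offset:
--             lo = mid + 1
--         else:
--             hi = mid
--     return lo
-- ===== Notes on version B (the rewrite author's own statement) =====
-- stated objective: alternative
-- what changed: Replaces A's linear subtract-and-break scan with a prefix-sum table built once and a hand-written bisect_right binary search over it; Pre_ restricts to nonnegative tsv sizes (the natural domain of file counts, where the prefix sums are monotone) and excludes inputs where A raises AssertionError.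
-- outside the precondition, e.g. on find_start_tsv_idx([5, -5, 5], 4): A returns 0, B returns 2
import Mathlib
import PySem

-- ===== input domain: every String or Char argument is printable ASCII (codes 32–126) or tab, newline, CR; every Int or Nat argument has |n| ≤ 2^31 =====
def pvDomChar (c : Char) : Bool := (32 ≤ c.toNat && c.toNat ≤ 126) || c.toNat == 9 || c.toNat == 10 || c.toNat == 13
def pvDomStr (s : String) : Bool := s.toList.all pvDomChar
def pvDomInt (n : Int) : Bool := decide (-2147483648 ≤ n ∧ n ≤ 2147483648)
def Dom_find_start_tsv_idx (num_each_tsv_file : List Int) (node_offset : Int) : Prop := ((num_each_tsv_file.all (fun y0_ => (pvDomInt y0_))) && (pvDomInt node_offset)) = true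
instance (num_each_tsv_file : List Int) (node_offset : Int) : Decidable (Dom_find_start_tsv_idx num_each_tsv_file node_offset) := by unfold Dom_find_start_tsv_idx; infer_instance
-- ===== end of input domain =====

-- B replaces A's linear subtract-and-break scan by a prefix-sum table plus a binary search;
-- equivalence is proved on nonnegative tsv sizes where A's assert passes (Pre_).

-- ===== PORT A =====
-- A's for-loop with break, carrying the running remainder x and the index.
-- Where the Python assert fires (loop finds nothing) goA is none; Pre_ excludes
-- those inputs and the port returns 0 there.
def goA : List Int → Int → Int → Option Int
  | [], _, _ => none
  | t :: rest, x, i =>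
    let x' := x - t
    if x' < 0 then some i else goA rest x' (i + 1)

def find_start_tsv_idx (num_each_tsv_file : List Int) (node_offset : Int) : Int :=
  (goA num_each_tsv_file node_offset 0).getD 0

-- ===== PORT B =====
-- first loop of Source B: the prefix list and the running total
def accumB : List Int → Int → List Int
  | [], _ => []
  | t :: rest, acc => (acc + t) :: accumB rest (acc + t)

-- while-loop of Source B; mid is always a valid index (lo < hi ≤ len), so getD 0 is
-- exact for prefix[mid]; (lo+hi)/2 on Nat matches Python's // on nonnegative ints
def bsearchB (pfx : List Int) (off : Int) (lo hi : Nat) : Nat :=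
  if lo < hi then
    let mid := (lo + hi) / 2
    if pfx.getD mid 0 ≤ off then bsearchB pfx off (mid + 1) hi
    else bsearchB pfx off lo mid
  else lo
termination_by hi - lo
decreasing_by all_goals omega

-- the assert: on Pre_ it passes; where it would raise the port returns 0
def find_start_tsv_idx_alt (num_each_tsv_file : List Int) (node_offset : Int) : Int :=
  let pfx := accumB num_each_tsv_file 0
  let total := num_each_tsv_file.foldl (· + ·) 0
  if node_offset < total then (bsearchB pfx node_offset 0 pfx.length : Int) else 0

-- ===== PRECONDITION & SPEC =====
-- Pre_ restricts to nonnegative tsv sizes — the function's natural domain of file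
-- counts, where the prefix sums are monotone — and excludes the inputs on which
-- the Python assert raises (empty list, or offset not below the total).
def Pre_find_start_tsv_idx (num_each_tsv_file : List Int) (node_offset : Int) : Prop :=
  num_each_tsv_file ≠ [] ∧ (∀ t ∈ num_each_tsv_file, 0 ≤ t) ∧ node_offset < num_each_tsv_file.sum
instance (num_each_tsv_file : List Int) (node_offset : Int) : Decidable (Pre_find_start_tsv_idx num_each_tsv_file node_offset) := by unfold Pre_find_start_tsv_idx; infer_instance

def pvWitness_find_start_tsv_idx : List Int × Int := ([5], 0)

def Spec_find_start_tsv_idx (num_each_tsv_file : List Int) (node_offset : Int) (out : Int) : Prop := out = find_start_tsv_idx_alt num_each_tsv_file node_offset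
instance (num_each_tsv_file : List Int) (node_offset : Int) (out : Int) : Decidable (Spec_find_start_tsv_idx num_each_tsv_file node_offset out) := by unfold Spec_find_start_tsv_idx; infer_instance

-- ===== CLAIM (what is proved, stated in full; the proofs are below) =====
def Claim_equal_find_start_tsv_idx : Prop := ∀ (num_each_tsv_file : List Int) (node_offset : Int), Dom_find_start_tsv_idx num_each_tsv_file node_offset → Pre_find_start_tsv_idx num_each_tsv_file node_offset → Spec_find_start_tsv_idx num_each_tsv_file node_offset (find_start_tsv_idx num_each_tsv_file node_offset)

-- ===== LEMMAS AND PROOFS =====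

-- reference: first index whose prefix sum exceeds the offset
def Fref : List Int → Int → Option Nat
  | [], _ => none
  | t :: rest, off => if off < t then some 0 else (Fref rest (off - t)).map (· + 1)

theorem goA_eq_Fref (l : List Int) (x : Int) (i : Int) :
    goA l x i = (Fref l x).map (fun j => i + Int.ofNat j) := by
  induction l generalizing x i with
  | nil => simp [goA, Fref]
  | cons t rest ih =>
    by_cases h : x - t < 0
    · have h' : x < t := by omega
      simp [goA, Fref, h, h']
    · have h' : ¬ x < t := by omega
      simp only [goA, Fref, if_neg h, if_neg h']
      rw [ih]
      cases hF : Fref rest (x - t) with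
      | none => simp
      | some j =>
        simp only [Option.map_some, Option.some.injEq, Int.ofNat_eq_natCast]
        push_cast
        ring

theorem Fref_lt_length (l : List Int) (x : Int) (j : Nat) (h : Fref l x = some j) :
    j < l.length := by
  induction l generalizing x j with
  | nil => simp [Fref] at h
  | cons t rest ih =>
    by_cases hx : x < t
    · simp only [Fref, if_pos hx, Option.some.injEq] at h
      subst h; simp
    · simp only [Fref, if_neg hx, Option.map_eq_some_iff] at h
      obtain ⟨j', hj', rfl⟩ := h
      have := ih _ _ hj'
      simp; omega

theorem Fref_none_prefix (l : List Int) (x : Int) (h : Fref l x = none) :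
    ∀ i < l.length, (l.take (i + 1)).sum ≤ x := by
  induction l generalizing x with
  | nil => intro i hi; simp at hi
  | cons t rest ih =>
    simp only [Fref] at h
    by_cases hx : x < t
    · simp [hx] at h
    · simp only [if_neg hx, Option.map_eq_none_iff] at h
      intro i hi
      cases i with
      | zero => simpa using not_lt.mp hx
      | succ i' =>
        have := ih (x - t) h i' (by simpa using hi)
        simp only [List.take_succ_cons, List.sum_cons]
        omega

theorem Fref_some_of_lt_sum (l : List Int) (x : Int) (hne : l ≠ [])
    (hlt : x < l.sum) : ∃ j, Fref l x = some j := by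
  cases hF : Fref l x with
  | some j => exact ⟨j, rfl⟩
  | none =>
    exfalso
    have hlen : 0 < l.length := List.length_pos_iff.mpr hne
    have := Fref_none_prefix l x hF (l.length - 1) (by omega)
    rw [show l.length - 1 + 1 = l.length from by omega, List.take_length] at this
    omega

-- Fref j is the least index whose accumB prefix sum exceeds the offset
theorem Fref_spec (l : List Int) (off : Int) (j : Nat) :
    ∀ c, Fref l (off - c) = some j →
      off < (accumB l c).getD j 0 ∧ ∀ i < j, ¬ off < (accumB l c).getD i 0 := by
  induction l generalizing j with
  | nil => intro c h; simp [Fref] at h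
  | cons t rest ih =>
    intro c h
    simp only [Fref] at h
    by_cases hx : off - c < t
    · simp only [if_pos hx, Option.some.injEq] at h
      subst h
      constructor
      · simp [accumB]; omega
      · intro i hi; omega
    · simp only [if_neg hx, Option.map_eq_some_iff] at h
      obtain ⟨j', hj', rfl⟩ := h
      have hrw : off - c - t = off - (c + t) := by ring
      rw [hrw] at hj'
      obtain ⟨h1, h2⟩ := ih j' (c + t) hj'
      refine ⟨by simpa [accumB] using h1, ?_⟩
      intro i hi
      cases i with
      | zero => simp [accumB]; omega
      | succ i' =>
        have := h2 i' (by omega)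
        simpa [accumB] using this

theorem accumB_getD_ge (l : List Int) (h : ∀ t ∈ l, 0 ≤ t) (c : Int) :
    ∀ k < l.length, c ≤ (accumB l c).getD k 0 := by
  induction l generalizing c with
  | nil => intro k hk; simp at hk
  | cons t rest ih =>
    intro k hk
    have ht : 0 ≤ t := h t (by simp)
    cases k with
    | zero => simp [accumB]; omega
    | succ k' =>
      have := ih (fun u hu => h u (by simp [hu])) (c + t) k' (by simpa using hk)
      simp only [accumB, List.getD_cons_succ]
      omega

theorem accumB_getD_mono (l : List Int) (h : ∀ t ∈ l, 0 ≤ t) (c : Int) :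
    ∀ i k, i ≤ k → k < l.length → (accumB l c).getD i 0 ≤ (accumB l c).getD k 0 := by
  induction l generalizing c with
  | nil => intro i k _ hk; simp at hk
  | cons t rest ih =>
    intro i k hik hk
    cases k with
    | zero =>
      interval_cases i
      exact le_refl _
    | succ k' =>
      cases i with
      | zero =>
        have := accumB_getD_ge rest (fun u hu => h u (by simp [hu])) (c + t) k' (by simpa using hk)
        simp only [accumB, List.getD_cons_zero, List.getD_cons_succ]
        omega
      | succ i' =>
        have := ih (fun u hu => h u (by simp [hu])) (c + t) i' k' (by omega) (by simpa using hk)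
        simpa [accumB] using this

theorem accumB_length (l : List Int) (c : Int) : (accumB l c).length = l.length := by
  induction l generalizing c with
  | nil => rfl
  | cons t rest ih => simp [accumB, ih]

theorem foldl_add_eq_sum (l : List Int) : ∀ c : Int, l.foldl (· + ·) c = c + l.sum := by
  induction l with
  | nil => intro c; simp
  | cons t rest ih =>
    intro c
    simp only [List.foldl_cons, List.sum_cons, ih]
    ring

theorem bsearch_eq (pfx : List Int) (off : Int) (j : Nat)
    (hmono : ∀ i k, i ≤ k → k < pfx.length → pfx.getD i 0 ≤ pfx.getD k 0)
    (hPj : off < pfx.getD j 0)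
    (hleast : ∀ i, i < j → ¬ off < pfx.getD i 0) :
    ∀ n lo hi, hi - lo = n → lo ≤ j → j ≤ hi → hi ≤ pfx.length →
      bsearchB pfx off lo hi = j := by
  intro n
  induction n using Nat.strong_induction_on with
  | _ n ih =>
    intro lo hi hn hloj hjhi hhilen
    by_cases hlt : lo < hi
    · rw [bsearchB, if_pos hlt]
      set mid := (lo + hi) / 2 with hmid
      have hmlo : lo ≤ mid := by omega
      have hmhi : mid < hi := by omega
      by_cases hc : pfx.getD mid 0 ≤ off
      · rw [if_pos hc]
        have hjm : mid < j := by
          by_contra hcon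
          have : pfx.getD j 0 ≤ pfx.getD mid 0 :=
            hmono j mid (by omega) (by omega)
          omega
        exact ih (hi - (mid + 1)) (by omega) (mid + 1) hi rfl (by omega) hjhi hhilen
      · rw [if_neg hc]
        have hjm : j ≤ mid := by
          by_contra hcon
          exact (hleast mid (by omega)) (by omega)
        exact ih (mid - lo) (by omega) lo mid rfl hloj hjm (by omega)
    · rw [bsearchB, if_neg hlt]
      omega

-- ===== VERDICT (by name: the statement is the Claim_ definition above) =====
theorem find_start_tsv_idx_spec : Claim_equal_find_start_tsv_idx := by
  intro l off _ hPre
  obtain ⟨hne, hnn, hlt⟩ := hPre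
  unfold Spec_find_start_tsv_idx find_start_tsv_idx find_start_tsv_idx_alt
  obtain ⟨j, hj⟩ := Fref_some_of_lt_sum l off hne hlt
  have hj0 : Fref l (off - 0) = some j := by simpa using hj
  obtain ⟨hPj, hleast⟩ := Fref_spec l off j 0 hj0
  have hjlen : j < l.length := Fref_lt_length l off j hj
  have hmono : ∀ i k, i ≤ k → k < (accumB l 0).length →
      (accumB l 0).getD i 0 ≤ (accumB l 0).getD k 0 := by
    rw [accumB_length]; exact accumB_getD_mono l hnn 0
  rw [goA_eq_Fref, hj]
  simp only [foldl_add_eq_sum, zero_add, if_pos hlt]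
  rw [bsearch_eq (accumB l 0) off j hmono hPj hleast
      ((accumB l 0).length - 0) 0 (accumB l 0).length rfl (by omega)
      (by rw [accumB_length]; omega) (le_refl _)]
  simp
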